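-- pv_equiv track=rewrite | github.com/yippp/Musier | Database/generate_abcjs.py | period_to_abcjs
-- ===== SOURCE A (Python) =====
-- def period_to_abcjs(seq, numerator, denominator, key, scale):
--     dictionary = ["C,", "^C,", "D,", "^D,", "E,", "F,", "^F,", "G,", "^G,", "A,", "^A,", "B,",
--                   "C", "^C", "D", "^D", "E", "F", "^F", "G", "^G", "A", "^A", "B",
--                   "c", "^c", "d", "^d", "e", "f", "^f", "g", "^g", "a", "^a", "b",
--                   "c'", "^c'", "d'", "^d'", "e'", "f'", "^F'", "g'", "^g'", "a'", "^a'", "b'"]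
--     count = 1
--     note_count = 0
--     period_count = -1
--     long_note = False
--     generated_notions = '''X: 1\nM: %d/%d\nL: 1/%d\nK: %s\n''' % (numerator, denominator, scale, key)
--     for i in range(len(seq)):
--         if seq[i] is None:
--             count += 1
--             long_note = True
--         else:
--             if long_note is True:
--                 generated_notions += str(count)
--                 count = 1
--                 long_note = False
--             if ((note_count) % (scale // denominator * numerator)) == 0:
--                 period_count += 1
--                 generated_notions += "|"
--                 if ((period_count % 4) == 0) and (period_count != 0):
--                     generated_notions += "\n"
--             generated_notions += dictionary[12 + seq[i]]
--         note_count += 1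
--     if seq[-1] is None:
--         generated_notions += str(count)
--     return generated_notions
-- ===== SOURCE B (Python) =====
-- def period_to_abcjs(seq, numerator, denominator, key, scale):
--     dictionary = ["C,", "^C,", "D,", "^D,", "E,", "F,", "^F,", "G,", "^G,", "A,", "^A,", "B,",
--                   "C", "^C", "D", "^D", "E", "F", "^F", "G", "^G", "A", "^A", "B",
--                   "c", "^c", "d", "^d", "e", "f", "^f", "g", "^g", "a", "^a", "b",
--                   "c'", "^c'", "d'", "^d'", "e'", "f'", "^F'", "g'", "^g'", "a'", "^a'", "b'"]
--     out = ["X: 1\nM: %d/%d\nL: 1/%d\nK: %s\n" % (numerator, denominator, scale, key)]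
--     notes = [(p, v) for p, v in enumerate(seq) if v is not None]
--     bar_len = scale // denominator * numerator if notes else None
--     prev = -1
--     bars = 0
--     for p, v in notes:
--         run = p - prev - 1
--         if run != 0:
--             out.append(str(run + 1))
--         if p % bar_len == 0:
--             out.append("|\n" if bars != 0 and bars % 4 == 0 else "|")
--             bars += 1
--         out.append(dictionary[12 + v])
--         prev = p
--     if seq[-1] is None:
--         out.append(str(len(seq) - prev))
--     return "".join(out)
-- ===== Notes on version B (the rewrite author's own statement) =====
-- stated objective: alternative
-- what changed: A's single stateful loop with count/long_note/period_count flags is replaced by a two-pass decomposition: first collect the (position, note) pairs, then emit durations, bars and note names from position arithmetic (run = p - prev - 1) over that list.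
import Mathlib
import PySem

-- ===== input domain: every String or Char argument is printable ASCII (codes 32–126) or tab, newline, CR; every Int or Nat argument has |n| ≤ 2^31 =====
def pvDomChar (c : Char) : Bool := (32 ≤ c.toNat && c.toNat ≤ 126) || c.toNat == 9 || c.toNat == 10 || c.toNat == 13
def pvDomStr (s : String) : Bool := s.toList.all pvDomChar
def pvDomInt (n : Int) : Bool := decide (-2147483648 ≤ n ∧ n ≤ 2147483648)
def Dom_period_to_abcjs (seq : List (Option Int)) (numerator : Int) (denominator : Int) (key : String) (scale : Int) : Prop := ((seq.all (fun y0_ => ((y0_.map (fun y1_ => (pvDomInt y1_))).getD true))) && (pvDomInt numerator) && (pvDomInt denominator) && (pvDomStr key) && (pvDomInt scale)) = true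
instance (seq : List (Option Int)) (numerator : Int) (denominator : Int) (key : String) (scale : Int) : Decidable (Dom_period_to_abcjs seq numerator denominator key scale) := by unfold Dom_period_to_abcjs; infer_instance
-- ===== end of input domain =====

-- B replaces A's stateful flag/counter loop by a two-pass decomposition (collect the (position, note)
-- pairs once, then emit from position arithmetic); same return value, no speed claim.

-- ===== PORT A =====
-- the note-name table, a literal shared by Source A and Source B
def pvDict : List String := ["C,", "^C,", "D,", "^D,", "E,", "F,", "^F,", "G,", "^G,", "A,", "^A,", "B,",
  "C", "^C", "D", "^D", "E", "F", "^F", "G", "^G", "A", "^A", "B",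
  "c", "^c", "d", "^d", "e", "f", "^f", "g", "^g", "a", "^a", "b",
  "c'", "^c'", "d'", "^d'", "e'", "f'", "^F'", "g'", "^g'", "a'", "^a'", "b'"]

-- the header string '''X: 1\nM: %d/%d\nL: 1/%d\nK: %s\n''' % (numerator, denominator, scale, key)
def pvHeader (numerator denominator : Int) (key : String) (scale : Int) : String :=
  "X: 1\nM: " ++ PySem.Int.toStr numerator ++ "/" ++ PySem.Int.toStr denominator ++
  "\nL: 1/" ++ PySem.Int.toStr scale ++ "\nK: " ++ key ++ "\n"

-- A's for-loop; state (count, note_count, period_count, long_note, generated_notions); returns (gen, count)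
def pvLoopA (numerator denominator scale : Int) :
    List (Option Int) → Int → Int → Int → Bool → String → String × Int
  | [], count, _, _, _, gen => (gen, count)
  | none :: rest, count, note_count, period_count, _, gen =>
      pvLoopA numerator denominator scale rest (count + 1) (note_count + 1) period_count true gen
  | some v :: rest, count, note_count, period_count, long_note, gen =>
      let gen1 := if long_note then gen ++ PySem.Int.toStr count else gen
      let count1 := if long_note then 1 else count
      if PySem.Int.mod note_count (PySem.Int.floordiv scale denominator * numerator) = 0 then
        let pc1 := period_count + 1
        let gen2 := gen1 ++ "|"
        let gen3 := if PySem.Int.mod pc1 4 = 0 ∧ pc1 ≠ 0 then gen2 ++ "\n" else gen2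
        pvLoopA numerator denominator scale rest count1 (note_count + 1) pc1 false
          (gen3 ++ (PySem.List.pyGet? pvDict (12 + v)).getD "")
      else
        pvLoopA numerator denominator scale rest count1 (note_count + 1) period_count false
          (gen1 ++ (PySem.List.pyGet? pvDict (12 + v)).getD "")

def period_to_abcjs (seq : List (Option Int)) (numerator : Int) (denominator : Int) (key : String) (scale : Int) : String :=
  let r := pvLoopA numerator denominator scale seq 1 0 (-1) false (pvHeader numerator denominator key scale)
  match PySem.List.pyGet? seq (-1) with   -- if seq[-1] is None: gen += str(count)
  | some none => r.1 ++ PySem.Int.toStr r.2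
  | _ => r.1

-- ===== PORT B =====
-- Source B's copies of the dictionary literal and of the header expression
def pvDictB : List String := ["C,", "^C,", "D,", "^D,", "E,", "F,", "^F,", "G,", "^G,", "A,", "^A,", "B,",
  "C", "^C", "D", "^D", "E", "F", "^F", "G", "^G", "A", "^A", "B",
  "c", "^c", "d", "^d", "e", "f", "^f", "g", "^g", "a", "^a", "b",
  "c'", "^c'", "d'", "^d'", "e'", "f'", "^F'", "g'", "^g'", "a'", "^a'", "b'"]

def pvHeaderB (numerator denominator : Int) (key : String) (scale : Int) : String :=
  "X: 1\nM: " ++ PySem.Int.toStr numerator ++ "/" ++ PySem.Int.toStr denominator ++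
  "\nL: 1/" ++ PySem.Int.toStr scale ++ "\nK: " ++ key ++ "\n"
-- Source B's second pass over the (position, note) pairs; returns (out, prev)
def pvLoopB (barLen : Int) : List (Int × Int) → List String → Int → Int → List String × Int
  | [], out, prev, _ => (out, prev)
  | (p, v) :: rest, out, prev, bars =>
      let run := p - prev - 1
      let out1 := if run ≠ 0 then out ++ [PySem.Int.toStr (run + 1)] else out
      if PySem.Int.mod p barLen = 0 then
        pvLoopB barLen rest
          ((out1 ++ [if bars ≠ 0 ∧ PySem.Int.mod bars 4 = 0 then "|\n" else "|"]) ++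
            [(PySem.List.pyGet? pvDictB (12 + v)).getD ""]) p (bars + 1)
      else
        pvLoopB barLen rest (out1 ++ [(PySem.List.pyGet? pvDictB (12 + v)).getD ""]) p bars

def period_to_abcjs_alt (seq : List (Option Int)) (numerator : Int) (denominator : Int) (key : String) (scale : Int) : String :=
  let notes := (PySem.List.enumerate seq).filterMap (fun pv => pv.2.map (fun v => (pv.1, v)))
  -- Source B computes bar_len only when notes ≠ [] (else None); it is unused when notes = [], so the
  -- unconditional computation here is exact
  let barLen := PySem.Int.floordiv scale denominator * numerator
  let r := pvLoopB barLen notes [pvHeaderB numerator denominator key scale] (-1) 0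
  let out := if PySem.List.pyGet? seq (-1) = some none
    then r.1 ++ [PySem.Int.toStr ((seq.length : Int) - r.2)] else r.1
  PySem.Str.join "" out

-- ===== PRECONDITION & SPEC =====
-- Pre_ excludes exactly the inputs where the Python A raises: empty seq (IndexError on seq[-1]);
-- a non-None entry present while scale//denominator*numerator is 0 or denominator = 0
-- (ZeroDivisionError); a note outside [-60, 35] (IndexError on dictionary[12+note]).
def Pre_period_to_abcjs (seq : List (Option Int)) (numerator : Int) (denominator : Int) (key : String) (scale : Int) : Prop :=
  seq ≠ [] ∧
  ((∀ x ∈ seq, x = none) ∨ (denominator ≠ 0 ∧ PySem.Int.floordiv scale denominator * numerator ≠ 0)) ∧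
  (∀ v ∈ seq.filterMap id, -60 ≤ v ∧ v ≤ 35)
instance (seq : List (Option Int)) (numerator : Int) (denominator : Int) (key : String) (scale : Int) : Decidable (Pre_period_to_abcjs seq numerator denominator key scale) := by unfold Pre_period_to_abcjs; infer_instance

def pvWitness_period_to_abcjs : List (Option Int) × Int × Int × String × Int :=
  ([some 0, none, some 2], 4, 4, "C", 8)

def Spec_period_to_abcjs (seq : List (Option Int)) (numerator : Int) (denominator : Int) (key : String) (scale : Int) (out : String) : Prop := out = period_to_abcjs_alt seq numerator denominator key scale
instance (seq : List (Option Int)) (numerator : Int) (denominator : Int) (key : String) (scale : Int) (out : String) : Decidable (Spec_period_to_abcjs seq numerator denominator key scale out) := by unfold Spec_period_to_abcjs; infer_instance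

-- ===== CLAIM (what is proved, stated in full; the proofs are below) =====
def Claim_equal_period_to_abcjs : Prop := ∀ (seq : List (Option Int)) (numerator : Int) (denominator : Int) (key : String) (scale : Int), Dom_period_to_abcjs seq numerator denominator key scale → Pre_period_to_abcjs seq numerator denominator key scale → Spec_period_to_abcjs seq numerator denominator key scale (period_to_abcjs seq numerator denominator key scale)

-- ===== LEMMAS AND PROOFS =====

lemma pvDictB_eq : pvDictB = pvDict := rfl
lemma pvHeaderB_eq : pvHeaderB = pvHeader := rfl

lemma pvCharsJoinAppend (l : List (List Char)) (c : List Char) :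
    PySem.Chars.join [] (l ++ [c]) = PySem.Chars.join [] l ++ c := by
  induction l with
  | nil => simp [PySem.Chars.join_nil, PySem.Chars.join_singleton]
  | cons a l ih =>
    cases l with
    | nil => simp [PySem.Chars.join_singleton, PySem.Chars.join_cons_cons]
    | cons b r =>
      simp only [List.cons_append, PySem.Chars.join_cons_cons] at *
      simp [ih, List.append_assoc]

lemma pvJoinAppend (l : List String) (s : String) :
    PySem.Str.join "" (l ++ [s]) = PySem.Str.join "" l ++ s := by
  apply String.toList_inj.mp
  simp [PySem.Str.join, pvCharsJoinAppend]

lemma pvJoinSingleton (s : String) : PySem.Str.join "" [s] = s := by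
  apply String.toList_inj.mp
  simp [PySem.Str.join, PySem.Chars.join_singleton]

lemma pvSim (numerator denominator scale : Int) (s : List (Option Int)) :
    ∀ (i prev pc : Int) (out : List String), prev < i →
    pvLoopA numerator denominator scale s (i - prev) i pc (decide (prev ≠ i - 1)) (PySem.Str.join "" out)
      = (PySem.Str.join "" (pvLoopB (PySem.Int.floordiv scale denominator * numerator)
            ((PySem.List.enumerate s i).filterMap (fun pv => pv.2.map (fun v => (pv.1, v)))) out prev (pc + 1)).1,
         (i + (s.length : Int)) -
           (pvLoopB (PySem.Int.floordiv scale denominator * numerator)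
            ((PySem.List.enumerate s i).filterMap (fun pv => pv.2.map (fun v => (pv.1, v)))) out prev (pc + 1)).2) := by
  induction s with
  | nil =>
    intro i prev pc out h
    simp [pvLoopA, pvLoopB, PySem.List.enumerate]
  | cons x rest ih =>
    intro i prev pc out h
    rw [PySem.List.enumerate_cons]
    cases x with
    | none =>
      have e2 : (true : Bool) = decide (prev ≠ (i + 1) - 1) := by
        exact (decide_eq_true (by omega)).symm
      simp only [pvLoopA, List.filterMap_cons, Option.map_none]
      have e1 : i - prev + 1 = (i + 1) - prev := by ring
      rw [e1, e2, ih (i + 1) prev pc out (by omega)]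
      refine Prod.ext rfl ?_
      simp only [List.length_cons]
      push_cast
      ring
    | some v =>
      have hL : decide ((i : Int) ≠ (i + 1) - 1) = false := by
        simp only [decide_eq_false_iff_not]; omega
      simp only [pvLoopA, List.filterMap_cons, Option.map_some, pvLoopB, pvDictB_eq]
      -- align the flushed-duration string with B's run string
      have hflush : (if decide (prev ≠ i - 1) then PySem.Str.join "" out ++ PySem.Int.toStr (i - prev) else PySem.Str.join "" out)
          = PySem.Str.join "" (if i - prev - 1 ≠ 0 then out ++ [PySem.Int.toStr (i - prev - 1 + 1)] else out) := by
        by_cases hp : prev = i - 1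
        · simp [hp]
        · have h1 : i - prev - 1 ≠ 0 := by omega
          have h2 : i - prev - 1 + 1 = i - prev := by ring
          simp [hp, h1, h2, pvJoinAppend]
      have hcount : (if decide (prev ≠ i - 1) then (1 : Int) else i - prev) = (i + 1) - i := by
        by_cases hp : prev = i - 1
        · simp [hp]
        · simp [hp]
      rw [hflush, hcount]
      set out1 := (if i - prev - 1 ≠ 0 then out ++ [PySem.Int.toStr (i - prev - 1 + 1)] else out) with hout1
      by_cases hbar : PySem.Int.mod i (PySem.Int.floordiv scale denominator * numerator) = 0
      · simp only [hbar, if_true]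
        have hbarstr : (if PySem.Int.mod (pc + 1) 4 = 0 ∧ pc + 1 ≠ 0 then PySem.Str.join "" out1 ++ "|" ++ "\n" else PySem.Str.join "" out1 ++ "|")
            = PySem.Str.join "" (out1 ++ [if pc + 1 ≠ 0 ∧ PySem.Int.mod (pc + 1) 4 = 0 then "|\n" else "|"]) := by
          by_cases hc : PySem.Int.mod (pc + 1) 4 = 0 ∧ pc + 1 ≠ 0
          · have hc' : pc + 1 ≠ 0 ∧ PySem.Int.mod (pc + 1) 4 = 0 := ⟨hc.2, hc.1⟩
            rw [if_pos hc, if_pos hc', pvJoinAppend, String.append_assoc]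
            rfl
          · have hc' : ¬ (pc + 1 ≠ 0 ∧ PySem.Int.mod (pc + 1) 4 = 0) := fun h' => hc ⟨h'.2, h'.1⟩
            rw [if_neg hc, if_neg hc', pvJoinAppend]
        rw [hbarstr, ← pvJoinAppend, ← hL, ih (i + 1) i (pc + 1)
          ((out1 ++ [if pc + 1 ≠ 0 ∧ PySem.Int.mod (pc + 1) 4 = 0 then "|\n" else "|"]) ++
            [(PySem.List.pyGet? pvDict (12 + v)).getD ""]) (by omega)]
        refine Prod.ext rfl ?_
        simp only [List.length_cons]
        push_cast
        ring
      · simp only [hbar, if_false]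
        rw [← pvJoinAppend, ← hL, ih (i + 1) i pc
          (out1 ++ [(PySem.List.pyGet? pvDict (12 + v)).getD ""]) (by omega)]
        refine Prod.ext rfl ?_
        simp only [List.length_cons]
        push_cast
        ring

-- ===== VERDICT (by name: the statement is the Claim_ definition above) =====
theorem period_to_abcjs_spec : Claim_equal_period_to_abcjs := by
  unfold Claim_equal_period_to_abcjs
  intro seq numerator denominator key scale _ _
  unfold Spec_period_to_abcjs period_to_abcjs period_to_abcjs_alt
  simp only [pvHeaderB_eq]
  have h := pvSim numerator denominator scale seq 0 (-1) (-1) [pvHeader numerator denominator key scale] (by omega)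
  norm_num [pvJoinSingleton] at h
  rw [h]
  cases hg : PySem.List.pyGet? seq (-1) with
  | none => simp
  | some o =>
    cases o with
    | none => simp [pvJoinAppend]
    | some w => simp
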